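-- pv_equiv track=rewrite | github.com/showhey0119/aquabreeding2 | aquabreeding2/coalescent.py | get_index_structured
-- ===== SOURCE A (Python) =====
-- def get_index_structured(n_pop, n_female, n_male):
--     '''
--     Get index of females and males in the result of
--     msprime with population structure
--
--     Args:
--         n_pop (int): The number of population
--         n_female (tuple): The numbers of females in each population
--         n_male (tuple): The numbers of males in each population
--
--     Returns:
--         - list: Female index
--         - list: Male index
--     '''
--     tmp_i = 0
--     f_id = []
--     m_id = []
--     for i in range(n_pop):
--         # female
--         for _ in range(2*n_female[i]):
--             f_id.append(tmp_i)
--             tmp_i += 1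
--         # male
--         for _ in range(2*n_male[i]):
--             m_id.append(tmp_i)
--             tmp_i += 1
--     return f_id, m_id
-- ===== SOURCE B (Python) =====
-- def get_index_structured(n_pop, n_female, n_male):
--     # First pass: build one range block per population and sex, each starting
--     # where the previous block ended; then flatten the female blocks and the
--     # male blocks in two separate passes.
--     f_blocks = []
--     m_blocks = []
--     total = 0
--     for k in range(n_pop):
--         fb = range(total, total + 2 * n_female[k])
--         total += len(fb)
--         mb = range(total, total + 2 * n_male[k])
--         total += len(mb)
--         f_blocks.append(fb)
--         m_blocks.append(mb)
--     f_id = [i for b in f_blocks for i in b]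
--     m_id = [i for b in m_blocks for i in b]
--     return f_id, m_id
-- ===== Notes on version B (the rewrite author's own statement) =====
-- stated objective: alternative
-- what changed: Replaces A's element-by-element interleaved emission with a counter incremented per appended index by a block-level decomposition: one pass computes whole per-population range blocks (advancing by each block's length), and two separate flattening passes emit the female and male index lists.
import Mathlib
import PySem

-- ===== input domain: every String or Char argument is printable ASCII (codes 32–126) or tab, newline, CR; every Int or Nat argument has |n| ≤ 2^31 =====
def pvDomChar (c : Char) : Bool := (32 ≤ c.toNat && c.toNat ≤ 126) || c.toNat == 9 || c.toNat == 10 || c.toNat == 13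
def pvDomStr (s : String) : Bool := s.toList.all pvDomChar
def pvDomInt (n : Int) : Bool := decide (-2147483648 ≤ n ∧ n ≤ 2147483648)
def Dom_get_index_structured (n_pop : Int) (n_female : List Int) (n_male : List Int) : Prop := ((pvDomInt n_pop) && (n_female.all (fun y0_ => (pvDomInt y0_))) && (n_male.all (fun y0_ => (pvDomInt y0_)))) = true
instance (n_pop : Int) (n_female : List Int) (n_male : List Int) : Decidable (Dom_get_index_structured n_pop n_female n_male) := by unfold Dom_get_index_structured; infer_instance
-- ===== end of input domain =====

-- B replaces A's element-by-element interleaved emission with a block-level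
-- decomposition: one pass builds whole per-population range blocks, two
-- separate passes flatten them (objective: alternative).

-- ===== PORT A =====
def get_index_structured (n_pop : Int) (n_female : List Int) (n_male : List Int) : List Int × List Int :=
  let st := (PySem.List.pyRange 0 n_pop 1).foldl
    (fun (st : Int × List Int × List Int) i =>
      let fres := (PySem.List.pyRange 0 (2 * PySem.List.pyGetD n_female i 0) 1).foldl
        (fun (p : Int × List Int) _ => (p.1 + 1, p.2 ++ [p.1])) (st.1, st.2.1)
      let mres := (PySem.List.pyRange 0 (2 * PySem.List.pyGetD n_male i 0) 1).foldl
        (fun (p : Int × List Int) _ => (p.1 + 1, p.2 ++ [p.1])) (fres.1, st.2.2)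
      (mres.1, fres.2, mres.2))
    (0, [], [])
  (st.2.1, st.2.2)

-- ===== PORT B =====
-- Python's 'range' objects are ported as the index lists they denote;
-- 'len(fb)' is the list's length.
def get_index_structured_alt (n_pop : Int) (n_female : List Int) (n_male : List Int) : List Int × List Int :=
  let st := (PySem.List.pyRange 0 n_pop 1).foldl
    (fun (st : List (List Int) × List (List Int) × Int) k =>
      let fb := PySem.List.pyRange st.2.2 (st.2.2 + 2 * PySem.List.pyGetD n_female k 0) 1
      let t1 := st.2.2 + (fb.length : Int)
      let mb := PySem.List.pyRange t1 (t1 + 2 * PySem.List.pyGetD n_male k 0) 1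
      (st.1 ++ [fb], st.2.1 ++ [mb], t1 + (mb.length : Int)))
    ([], [], 0)
  (st.1.flatMap id, st.2.1.flatMap id)

-- ===== PRECONDITION & SPEC =====
-- Pre_ excludes exactly the inputs on which Python A raises IndexError:
-- some i < n_pop reaches n_female[i] or n_male[i] past the end of the tuple.
def Pre_get_index_structured (n_pop : Int) (n_female : List Int) (n_male : List Int) : Prop :=
  n_pop ≤ (n_female.length : Int) ∧ n_pop ≤ (n_male.length : Int)
instance (n_pop : Int) (n_female : List Int) (n_male : List Int) : Decidable (Pre_get_index_structured n_pop n_female n_male) := by unfold Pre_get_index_structured; infer_instance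

def pvWitness_get_index_structured : Int × List Int × List Int := (2, ([1, 0], [0, 2]))

def Spec_get_index_structured (n_pop : Int) (n_female : List Int) (n_male : List Int) (out : List Int × List Int) : Prop := out = get_index_structured_alt n_pop n_female n_male
instance (n_pop : Int) (n_female : List Int) (n_male : List Int) (out : List Int × List Int) : Decidable (Spec_get_index_structured n_pop n_female n_male out) := by unfold Spec_get_index_structured; infer_instance

-- ===== CLAIM (what is proved, stated in full; the proofs are below) =====
def Claim_equal_get_index_structured : Prop := ∀ (n_pop : Int) (n_female : List Int) (n_male : List Int), Dom_get_index_structured n_pop n_female n_male → Pre_get_index_structured n_pop n_female n_male → Spec_get_index_structured n_pop n_female n_male (get_index_structured n_pop n_female n_male)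

-- ===== LEMMAS AND PROOFS =====

def pvF (xs : List Int) (k : Nat) : Int := max (2 * xs.getD k 0) 0
def pvS (nf nm : List Int) : Nat → Int
  | 0 => 0
  | k + 1 => pvS nf nm k + pvF nf k + pvF nm k
def pvBlkF (nf nm : List Int) (k : Nat) : List Int :=
  PySem.List.pyRange (pvS nf nm k) (pvS nf nm k + pvF nf k) 1
def pvBlkM (nf nm : List Int) (k : Nat) : List Int :=
  PySem.List.pyRange (pvS nf nm k + pvF nf k) (pvS nf nm (k + 1)) 1
def pvBF (nf nm : List Int) (N : Nat) : List Int :=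
  (List.range N).flatMap (pvBlkF nf nm)
def pvBM (nf nm : List Int) (N : Nat) : List Int :=
  (List.range N).flatMap (pvBlkM nf nm)

lemma pvEmit_spec (L : List Int) (t : Int) (l : List Int) :
    L.foldl (fun (p : Int × List Int) _ => (p.1 + 1, p.2 ++ [p.1])) (t, l)
      = (t + L.length, l ++ PySem.List.pyRange t (t + L.length) 1) := by
  induction L generalizing t l with
  | nil => simp [PySem.List.pyRange_one_eq_nil]
  | cons x L ih =>
    simp only [List.foldl_cons, ih, List.length_cons]
    push_cast
    have h : PySem.List.pyRange t (t + ((L.length : Int) + 1)) 1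
        = t :: PySem.List.pyRange (t + 1) (t + ((L.length : Int) + 1)) 1 :=
      PySem.List.pyRange_one_cons (by omega)
    rw [h]
    have h2 : t + 1 + (L.length : Int) = t + ((L.length : Int) + 1) := by ring
    rw [h2]
    simp

lemma pvLenRange (a b : Int) : ((PySem.List.pyRange a b 1).length : Int) = max (b - a) 0 := by
  rw [PySem.List.length_pyRange_one]; omega

-- a range of possibly negative requested width equals the range clamped to width ≥ 0
lemma pvRangeClamp (a d : Int) :
    PySem.List.pyRange a (a + d) 1 = PySem.List.pyRange a (a + max d 0) 1 := by
  rcases (by omega : 0 ≤ d ∨ d < 0) with h | h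
  · rw [max_eq_left h]
  · rw [PySem.List.pyRange_one_eq_nil (by omega), PySem.List.pyRange_one_eq_nil (by omega)]

lemma pvA_fold (nf nm : List Int) (N : Nat) :
    (PySem.List.pyRange 0 (N : Int) 1).foldl
      (fun (st : Int × List Int × List Int) i =>
        let fres := (PySem.List.pyRange 0 (2 * PySem.List.pyGetD nf i 0) 1).foldl
          (fun (p : Int × List Int) _ => (p.1 + 1, p.2 ++ [p.1])) (st.1, st.2.1)
        let mres := (PySem.List.pyRange 0 (2 * PySem.List.pyGetD nm i 0) 1).foldl
          (fun (p : Int × List Int) _ => (p.1 + 1, p.2 ++ [p.1])) (fres.1, st.2.2)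
        (mres.1, fres.2, mres.2))
      (0, [], [])
      = (pvS nf nm N, pvBF nf nm N, pvBM nf nm N) := by
  induction N with
  | zero => simp [PySem.List.pyRange_one_eq_nil, pvS, pvBF, pvBM]
  | succ N ih =>
    have hr : PySem.List.pyRange 0 ((N + 1 : Nat) : Int) 1
        = PySem.List.pyRange 0 (N : Int) 1 ++ [(N : Int)] := by
      push_cast
      exact PySem.List.pyRange_one_succ_right (by omega)
    rw [hr, List.foldl_append, ih]
    simp only [pvEmit_spec]
    have hf : (((PySem.List.pyRange 0 (2 * PySem.List.pyGetD nf (N : Int) 0) 1).length : Nat) : Int) = pvF nf N := by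
      rw [pvLenRange]; simp [pvF]
    have hm : (((PySem.List.pyRange 0 (2 * PySem.List.pyGetD nm (N : Int) 0) 1).length : Nat) : Int) = pvF nm N := by
      rw [pvLenRange]; simp [pvF]
    simp only [List.foldl_cons, List.foldl_nil, hf, hm]
    refine Prod.ext ?_ (Prod.ext ?_ ?_) <;>
      simp [pvS, pvBF, pvBM, pvBlkF, pvBlkM, List.range_succ, add_assoc]

lemma pvB_fold (nf nm : List Int) (N : Nat) :
    (PySem.List.pyRange 0 (N : Int) 1).foldl
      (fun (st : List (List Int) × List (List Int) × Int) k =>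
        let fb := PySem.List.pyRange st.2.2 (st.2.2 + 2 * PySem.List.pyGetD nf k 0) 1
        let t1 := st.2.2 + (fb.length : Int)
        let mb := PySem.List.pyRange t1 (t1 + 2 * PySem.List.pyGetD nm k 0) 1
        (st.1 ++ [fb], st.2.1 ++ [mb], t1 + (mb.length : Int)))
      ([], [], 0)
      = ((List.range N).map (pvBlkF nf nm), (List.range N).map (pvBlkM nf nm), pvS nf nm N) := by
  induction N with
  | zero => simp [PySem.List.pyRange_one_eq_nil, pvS]
  | succ N ih =>
    have hr : PySem.List.pyRange 0 ((N + 1 : Nat) : Int) 1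
        = PySem.List.pyRange 0 (N : Int) 1 ++ [(N : Int)] := by
      push_cast
      exact PySem.List.pyRange_one_succ_right (by omega)
    rw [hr, List.foldl_append, ih]
    simp only [List.foldl_cons, List.foldl_nil]
    have hfb : PySem.List.pyRange (pvS nf nm N) (pvS nf nm N + 2 * PySem.List.pyGetD nf (N : Int) 0) 1
        = pvBlkF nf nm N := by
      rw [pvRangeClamp]; simp [pvBlkF, pvF]
    have hmb : PySem.List.pyRange (pvS nf nm N + pvF nf N) (pvS nf nm N + pvF nf N + 2 * PySem.List.pyGetD nm (N : Int) 0) 1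
        = pvBlkM nf nm N := by
      rw [pvRangeClamp]; simp [pvBlkM, pvS, pvF, add_assoc]
    have hlenF : ((pvBlkF nf nm N).length : Int) = pvF nf N := by
      rw [pvBlkF, pvLenRange]; simp [pvF]
    have hlenM : ((pvBlkM nf nm N).length : Int) = pvF nm N := by
      rw [pvBlkM, pvLenRange]; simp [pvS, pvF]
    simp only [hfb, hlenF, hmb, hlenM]
    refine Prod.ext ?_ (Prod.ext ?_ ?_) <;>
      simp [pvS, List.range_succ, add_assoc]

lemma pvMain (n_pop : Int) (nf nm : List Int) :
    get_index_structured n_pop nf nm = get_index_structured_alt n_pop nf nm := by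
  rcases (by omega : n_pop ≤ 0 ∨ 0 < n_pop) with h | h
  · simp [get_index_structured, get_index_structured_alt, PySem.List.pyRange_one_eq_nil h]
  · obtain ⟨N, rfl⟩ : ∃ N : Nat, n_pop = (N : Int) :=
      ⟨n_pop.toNat, (Int.toNat_of_nonneg h.le).symm⟩
    unfold get_index_structured get_index_structured_alt
    rw [pvA_fold, pvB_fold]
    simp [pvBF, pvBM, List.flatMap_map, Function.comp_def]

-- ===== VERDICT (by name: the statement is the Claim_ definition above) =====
theorem get_index_structured_spec : Claim_equal_get_index_structured := by
  intro n_pop nf nm _ _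
  exact pvMain n_pop nf nm
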